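-- pv_equiv track=rewrite | github.com/dennisjlee/adventofcode | 2022/day06.py | hard_way
-- ===== SOURCE A (Python) =====
-- from collections import Counter, deque
--
-- def hard_way(buffer, n):
--     counter = Counter(buffer[:n])
--     for i in range(n, len(buffer)):
--         if len(counter) == n:
--             return i
--         left = buffer[i-n]
--         counter[left] -= 1
--         if counter[left] == 0:
--             del counter[left]
--         counter[buffer[i]] += 1
-- ===== SOURCE B (Python) =====
-- def hard_way(buffer, n):
--     for i in range(n, len(buffer)):
--         if len(set(buffer[i-n:i])) == n:
--             return i
--     return None
-- ===== Notes on version B (the rewrite author's own statement) =====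
-- stated objective: simpler
-- what changed: Replaced the incrementally maintained sliding-window Counter (decrement/delete/increment bookkeeping per step) with an independent per-window test: slice the window and compare the size of its set of characters with n.
import Mathlib
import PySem

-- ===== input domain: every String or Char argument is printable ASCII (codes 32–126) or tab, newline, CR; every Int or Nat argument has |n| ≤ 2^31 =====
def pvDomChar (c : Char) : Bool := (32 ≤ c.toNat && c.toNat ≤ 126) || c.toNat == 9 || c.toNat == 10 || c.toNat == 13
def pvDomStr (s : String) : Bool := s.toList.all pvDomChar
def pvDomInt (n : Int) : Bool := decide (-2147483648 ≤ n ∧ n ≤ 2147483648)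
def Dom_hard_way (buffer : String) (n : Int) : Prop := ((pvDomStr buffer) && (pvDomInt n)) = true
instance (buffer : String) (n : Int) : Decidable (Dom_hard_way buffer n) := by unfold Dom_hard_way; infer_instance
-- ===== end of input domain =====

-- B replaces A's incrementally maintained Counter with an independent per-window distinct-count test
-- (objective: simpler — one slice + set per window instead of counter bookkeeping); same values on Pre_ (0 ≤ n).

-- ===== PORT A =====
-- the loop 'for i in range(n, len(buffer))' with early return, carrying the Counter.
-- buffer[i-n] / buffer[i] are ported with pyGetD: under Pre_ (0 ≤ n) both indices are in range,
-- exactly where Python does not raise; for n < 0 Python raises IndexError (excluded by Pre_).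
def hard_wayLoop (buf : List Char) (n : Int) : List Int → PySem.Dict Char Int → Option Int
  | [], _ => none
  | i :: rest, counter =>
    if (counter.size : Int) = n then some i
    else
      let left := PySem.List.pyGetD buf (i - n) ' '
      let c1 := counter.insert left (counter.getD left 0 - 1)      -- counter[left] -= 1
      let c2 := if c1.getD left 0 = 0 then c1.erase left else c1   -- if counter[left] == 0: del counter[left]
      let r := PySem.List.pyGetD buf i ' '
      hard_wayLoop buf n rest (c2.insert r (c2.getD r 0 + 1))      -- counter[buffer[i]] += 1

def hard_way (buffer : String) (n : Int) : Option Int :=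
  hard_wayLoop buffer.toList n (PySem.List.pyRange n (buffer.toList.length : Int) 1)
    (PySem.Dict.counter (PySem.List.slice buffer.toList none (some n)))   -- Counter(buffer[:n])

-- ===== PORT B =====
-- Source B: for i in range(n, len(buffer)): if len(set(buffer[i-n:i])) == n: return i
def hard_way_altLoop (buf : List Char) (n : Int) : List Int → Option Int
  | [] => none
  | i :: rest =>
    if ((PySem.Set.ofList (PySem.List.slice buf (some (i - n)) (some i))).length : Int) = n then some i
    else hard_way_altLoop buf n rest

def hard_way_alt (buffer : String) (n : Int) : Option Int :=
  hard_way_altLoop buffer.toList n (PySem.List.pyRange n (buffer.toList.length : Int) 1)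

-- ===== PRECONDITION & SPEC =====
-- Pre_ excludes exactly n < 0, where Python A raises IndexError (buffer[i-n] runs past the end).
def Pre_hard_way (buffer : String) (n : Int) : Prop := 0 ≤ n
instance (buffer : String) (n : Int) : Decidable (Pre_hard_way buffer n) := by unfold Pre_hard_way; infer_instance
def pvWitness_hard_way : String × Int := ("zcfzfwzzqfrljwzlrfnpqdbhtmscgvjw", 4)

def Spec_hard_way (buffer : String) (n : Int) (out : Option Int) : Prop := out = hard_way_alt buffer n
instance (buffer : String) (n : Int) (out : Option Int) : Decidable (Spec_hard_way buffer n out) := by unfold Spec_hard_way; infer_instance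

-- ===== CLAIM (what is proved, stated in full; the proofs are below) =====
def Claim_equal_hard_way : Prop := ∀ (buffer : String) (n : Int), Dom_hard_way buffer n → Pre_hard_way buffer n → Spec_hard_way buffer n (hard_way buffer n)
-- ===== LEMMAS AND PROOFS =====

-- the counter of A's loop represents the current window w: unique keys, exact counts, no zero entries
def CRep (d : PySem.Dict Char Int) (w : List Char) : Prop :=
  d.keys.Nodup ∧ (∀ c : Char, d.getD c 0 = (w.count c : Int)) ∧ (∀ c ∈ d.keys, d.getD c 0 ≠ 0)

-- PySem has no erase lemmas; these three are proved here from the definition (items.filter)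
theorem dict_get?_erase {κ ν : Type} [BEq κ] [LawfulBEq κ] [DecidableEq κ]
    (d : PySem.Dict κ ν) (k k' : κ) :
    (d.erase k).get? k' = if k' = k then none else d.get? k' := by
  rcases d with ⟨items⟩
  induction items with
  | nil => simp [PySem.Dict.erase, PySem.Dict.get?]
  | cons p rest ih =>
    simp only [PySem.Dict.erase, PySem.Dict.get?] at *
    by_cases hk : p.1 = k <;> by_cases hk' : p.1 = k' <;>
      simp_all

theorem dict_getD_erase {κ ν : Type} [BEq κ] [LawfulBEq κ] [DecidableEq κ]
    (d : PySem.Dict κ ν) (k k' : κ) (d0 : ν) :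
    (d.erase k).getD k' d0 = if k' = k then d0 else d.getD k' d0 := by
  simp only [PySem.Dict.getD, dict_get?_erase]
  split_ifs <;> rfl

theorem dict_keys_erase {κ ν : Type} [BEq κ] [LawfulBEq κ]
    (d : PySem.Dict κ ν) (k : κ) :
    (d.erase k).keys = d.keys.filter (fun x => !(x == k)) := by
  rcases d with ⟨items⟩
  induction items with
  | nil => simp [PySem.Dict.erase, PySem.Dict.keys]
  | cons p rest ih =>
    simp only [PySem.Dict.erase, PySem.Dict.keys] at *
    by_cases hk : p.1 = k <;> simp_all

-- under CRep, len(counter) is the number of distinct elements of the window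
theorem CRep.size_eq (d : PySem.Dict Char Int) (w : List Char) (h : CRep d w) :
    d.size = (PySem.Set.ofList w).length := by
  obtain ⟨hnd, hcnt, hnz⟩ := h
  have hmem : ∀ c : Char, c ∈ d.keys ↔ c ∈ PySem.Set.ofList w := by
    intro c
    rw [PySem.Set.mem_ofList]
    constructor
    · intro hc
      have := hnz c hc
      rw [hcnt c] at this
      have : w.count c ≠ 0 := by exact_mod_cast fun h0 => this (by simp [h0])
      exact List.count_pos_iff.mp (Nat.pos_of_ne_zero this)
    · intro hc
      by_contra hnk
      have hcont : d.contains c = false := by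
        by_contra hcc
        exact hnk ((PySem.Dict.contains_iff_mem_keys d c).mp (by simpa using hcc))
      have h0 := PySem.Dict.getD_of_not_contains d (0 : Int) hcont
      rw [hcnt c] at h0
      have : w.count c = 0 := by exact_mod_cast h0
      exact absurd (List.count_pos_iff.mpr hc) (by omega)
  have hperm : d.keys.Perm (PySem.Set.ofList w) :=
    (List.perm_ext_iff_of_nodup hnd (PySem.Set.nodup_ofList w)).mpr hmem
  have : d.keys.length = (PySem.Set.ofList w).length := hperm.length_eq
  simpa [PySem.Dict.keys, PySem.Dict.size] using this

-- sliding the counter: one step of A's update turns a representation of (left :: mid) into one of (mid ++ [right])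
theorem CRep.slide (d : PySem.Dict Char Int) (left right : Char) (mid : List Char)
    (h : CRep d (left :: mid)) :
    CRep ((if (d.insert left (d.getD left 0 - 1)).getD left 0 = 0
          then (d.insert left (d.getD left 0 - 1)).erase left
          else d.insert left (d.getD left 0 - 1)).insert right
         ((if (d.insert left (d.getD left 0 - 1)).getD left 0 = 0
           then (d.insert left (d.getD left 0 - 1)).erase left
           else d.insert left (d.getD left 0 - 1)).getD right 0 + 1))
      (mid ++ [right]) := by
  obtain ⟨hnd, hcnt, hnz⟩ := h
  set d1 := d.insert left (d.getD left 0 - 1) with hd1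
  set d2 := if d1.getD left 0 = 0 then d1.erase left else d1 with hd2
  have hd1getD : ∀ c : Char, d1.getD c 0 = if c = left then d.getD left 0 - 1 else d.getD c 0 := by
    intro c; simp [hd1, PySem.Dict.getD_insert]
  have hd2getD : ∀ c : Char, d2.getD c 0 = (mid.count c : Int) := by
    intro c
    have hcl : d.getD left 0 = ((left :: mid).count left : Int) := hcnt left
    rw [List.count_cons] at hcl
    simp only [beq_self_eq_true, if_true] at hcl
    rw [hd2]
    split_ifs with hz
    · rw [dict_getD_erase]
      rw [hd1getD] at hz
      simp only [if_true] at hz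
      split_ifs with hce
      · subst hce; omega
      · rw [hd1getD, if_neg hce, hcnt c, List.count_cons]
        have : (left == c) = false := by simp [Ne.symm hce]
        simp [this]
    · rw [hd1getD]
      split_ifs with hce
      · subst hce; omega
      · rw [hcnt c, List.count_cons]
        have : (left == c) = false := by simp [Ne.symm hce]
        simp [this]
  have hd2nd : d2.keys.Nodup := by
    rw [hd2]
    have h1 : d1.keys.Nodup := PySem.Dict.nodup_keys_insert d left _ hnd
    split_ifs
    · rw [dict_keys_erase]; exact h1.filter _
    · exact h1
  have hd2mem : ∀ c ∈ d2.keys, d2.getD c 0 ≠ 0 := by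
    intro c hc
    rw [hd2getD]
    rw [hd2] at hc
    split_ifs at hc with hz
    · rw [dict_keys_erase, List.mem_filter] at hc
      obtain ⟨hc1, hc2⟩ := hc
      have hcne : c ≠ left := by simpa using hc2
      rw [hd1, PySem.Dict.mem_keys_insert] at hc1
      rcases hc1 with h | h
      · exact absurd h hcne
      · have := hnz c h
        rw [hcnt c, List.count_cons] at this
        have hb : (left == c) = false := by simp [Ne.symm hcne]
        rw [hb] at this; simp at this
        exact_mod_cast fun h0 => this (by simp [h0])
    · by_cases hce : c = left
      · subst hce
        rw [hd1getD] at hz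
        simp only [if_true] at hz
        have hcl : d.getD c 0 = ((c :: mid).count c : Int) := hcnt c
        rw [List.count_cons] at hcl
        simp only [beq_self_eq_true, if_true] at hcl
        intro h0
        have : (mid.count c : Int) = 0 := by exact_mod_cast h0
        omega
      · rw [hd1, PySem.Dict.mem_keys_insert] at hc
        rcases hc with h | h
        · exact absurd h hce
        · have := hnz c h
          rw [hcnt c, List.count_cons] at this
          have hb : (left == c) = false := by simp [Ne.symm hce]
          rw [hb] at this; simp at this
          exact_mod_cast fun h0 => this (by simp [h0])
  refine ⟨PySem.Dict.nodup_keys_insert d2 right _ hd2nd, ?_, ?_⟩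
  · intro c
    rw [PySem.Dict.getD_insert]
    split_ifs with hcr
    · subst hcr
      rw [hd2getD, List.count_append, List.count_singleton]
      push_cast; simp
    · rw [hd2getD, List.count_append, List.count_cons]
      have : (right == c) = false := by simp [Ne.symm hcr]
      simp [this]
  · intro c hc
    rw [PySem.Dict.getD_insert]
    split_ifs with hcr
    · rw [hd2getD]; omega
    · rw [PySem.Dict.mem_keys_insert] at hc
      rcases hc with h | h
      · exact absurd h hcr
      · rw [hd2getD]
        have := hd2mem c h
        rw [hd2getD] at this
        exact this

-- the two loops agree over range(a, len(buf)) whenever the counter represents the window ending at a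
theorem loop_eq (buf : List Char) (n : Int) (hn : 0 ≤ n) :
    ∀ (k : Nat) (a : Int) (d : PySem.Dict Char Int),
      (buf.length : Int) - a ≤ (k : Int) → n ≤ a →
      CRep d (PySem.List.slice buf (some (a - n)) (some a)) →
      hard_wayLoop buf n (PySem.List.pyRange a (buf.length : Int) 1) d
        = hard_way_altLoop buf n (PySem.List.pyRange a (buf.length : Int) 1) := by
  intro k
  induction k with
  | zero =>
    intro a d hk _ _
    rw [PySem.List.pyRange_one_eq_nil (by omega)]
    rfl
  | succ k ih =>
    intro a d hk ha hrep
    by_cases hlt : a < (buf.length : Int)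
    · rw [PySem.List.pyRange_one_cons hlt]
      simp only [hard_wayLoop, hard_way_altLoop]
      rw [hrep.size_eq]
      set w := PySem.List.slice buf (some (a - n)) (some a) with hw
      by_cases hcond : ((PySem.Set.ofList w).length : Int) = n
      · simp only [if_pos hcond]
      · simp only [if_neg hcond] -- sliding step: identify the window's head/tail and the new window
        set m : Nat := (a - n).toNat with hm
        have h0an : (0:Int) ≤ a - n := by omega
        have h0a : (0:Int) ≤ a := by omega
        have hatn : a.toNat = m + n.toNat := by omega
        have hmlen : m + n.toNat < buf.length := by omega
        have hwdef : w = (buf.drop m).take n.toNat := by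
          rw [hw, PySem.List.slice_toNat buf h0an h0a]
          congr 1; omega
        -- n.toNat ≥ 1 in this branch: otherwise the window is empty and the test would have held
        have hnn : 1 ≤ n.toNat := by
          by_contra hz
          have h0 : n = 0 := by omega
          apply hcond
          rw [hwdef]
          simp [h0]
        have hmlt : m < buf.length := by omega
        have hdrop : buf.drop m = buf[m] :: buf.drop (m + 1) := (List.getElem_cons_drop hmlt).symm
        obtain ⟨j, hj⟩ : ∃ j, n.toNat = j + 1 := ⟨n.toNat - 1, by omega⟩
        have hsplit : w = buf[m] :: (buf.drop (m + 1)).take (n.toNat - 1) := by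
          rw [hwdef, hdrop, hj, List.take_succ_cons, Nat.add_sub_cancel]
        have hleft : PySem.List.pyGetD buf (a - n) ' ' = buf[m] := by
          rw [PySem.List.pyGetD_eq_getElem buf ' ' h0an (by exact_mod_cast by omega)]
        have hright : PySem.List.pyGetD buf a ' ' = buf[m + n.toNat]'hmlen := by
          rw [PySem.List.pyGetD_eq_getElem buf ' ' h0a (by exact_mod_cast by omega)]
          congr 1
        have hnew : PySem.List.slice buf (some (a + 1 - n)) (some (a + 1))
            = (buf.drop (m + 1)).take (n.toNat - 1) ++ [buf[m + n.toNat]'hmlen] := by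
          rw [PySem.List.slice_toNat buf (by omega) (by omega)]
          have h1 : (a + 1 - n).toNat = m + 1 := by omega
          have h2 : (a + 1).toNat - (m + 1) = n.toNat := by omega
          rw [h1, h2]
          have hidx : j < (buf.drop (m + 1)).length := by
            rw [List.length_drop]; omega
          conv_lhs => rw [hj, List.take_add_one]
          rw [List.getElem?_eq_getElem hidx]
          have hij : m + 1 + j = m + n.toNat := by omega
          have hj' : n.toNat - 1 = j := by omega
          simp [List.getElem_drop, hij, hj']
        rw [hleft, hright]
        apply ih (a + 1) _ (by omega) (by omega)
        rw [hnew]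
        have hrep' : CRep d (buf[m] :: (buf.drop (m + 1)).take (n.toNat - 1)) := by
          rw [← hsplit]; exact hrep
        exact CRep.slide d _ _ _ hrep'
    · rw [PySem.List.pyRange_one_eq_nil (by omega)]
      rfl

-- Counter(buffer[:n]) represents the initial window buffer[n-n:n]
theorem rep_init (buf : List Char) (n : Int) (hn : 0 ≤ n) :
    CRep (PySem.Dict.counter (PySem.List.slice buf none (some n)))
      (PySem.List.slice buf (some (n - n)) (some n)) := by
  have hw : PySem.List.slice buf (some (n - n)) (some n) = PySem.List.slice buf none (some n) := by
    rw [PySem.List.slice_toNat buf (by omega) hn, PySem.List.slice_to buf hn]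
    simp
  rw [hw]
  set xs := PySem.List.slice buf none (some n) with hxs
  refine ⟨PySem.Dict.nodup_keys_counter xs, fun c => PySem.Dict.getD_counter xs c, ?_⟩
  intro c hc
  rw [PySem.Dict.keys_counter, PySem.Set.mem_ofList] at hc
  rw [PySem.Dict.getD_counter]
  have := List.count_pos_iff.mpr hc
  exact_mod_cast by omega

-- ===== VERDICT (by name: the statement is the Claim_ definition above) =====
theorem hard_way_spec : Claim_equal_hard_way := by
  intro buffer n _ hpre
  unfold Spec_hard_way hard_way hard_way_alt
  have hn : (0:Int) ≤ n := hpre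
  exact loop_eq buffer.toList n hn buffer.toList.length n _
    (by omega) (le_refl n) (rep_init buffer.toList n hpre)
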